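-- pv_equiv track=rewrite | github.com/Antithesise/NLP | TextTools.py | gridify
-- ===== SOURCE A (Python) =====
-- def gridify(text: str, w: int, padding: str | None=None) -> list[list[str]]:
--     g = []
--
--     for i in range(0, len(text), w):
--         if i + w <= len(text):
--             g += [list(text[i:i+w])]
--         else:
--             g += [list((text + padding * w)[i:i+w])]
--
--     return g
-- ===== SOURCE B (Python) =====
-- def gridify(text: str, w: int, padding: str | None=None) -> list[list[str]]:
--     if w <= 0:
--         return []
--     rows = []
--     cur = []
--     for ch in text:
--         cur.append(ch)
--         if len(cur) == w:
--             rows.append(cur)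
--             cur = []
--     if cur:
--         for ch in padding * w:
--             if len(cur) == w:
--                 break
--             cur.append(ch)
--         rows.append(cur)
--     return rows
-- ===== Notes on version B (the rewrite author's own statement) =====
-- stated objective: alternative
-- what changed: A stride-slices the string with range(0,len,w) and rebuilds text+padding*w for the overflow row; B never slices or indexes: it makes one character-by-character pass, accumulating the current row and flushing it whenever it reaches width w, then tops up the leftover row from padding*w.
import Mathlib
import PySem

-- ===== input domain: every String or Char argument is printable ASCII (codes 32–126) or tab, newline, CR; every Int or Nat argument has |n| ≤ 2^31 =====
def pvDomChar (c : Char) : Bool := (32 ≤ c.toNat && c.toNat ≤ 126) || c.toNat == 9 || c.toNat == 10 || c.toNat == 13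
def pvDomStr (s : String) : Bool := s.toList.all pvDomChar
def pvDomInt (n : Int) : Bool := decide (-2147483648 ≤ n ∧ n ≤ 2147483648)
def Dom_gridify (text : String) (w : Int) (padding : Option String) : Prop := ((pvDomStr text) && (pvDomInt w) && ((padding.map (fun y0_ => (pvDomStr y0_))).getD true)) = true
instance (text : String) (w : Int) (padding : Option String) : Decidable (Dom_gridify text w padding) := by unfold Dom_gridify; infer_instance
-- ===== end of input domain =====

-- A stride-slices the string with range(0, len, w), rebuilding text + padding*w for the overflow row;
-- B never slices: one character-by-character pass accumulates the current row and flushes it at width w,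
-- then tops up the leftover row from padding*w (objective: alternative).

-- Python's `padding * w` (str * int; a non-positive count gives ''). For padding = None Python raises
-- TypeError — those inputs are outside Pre_gridify; here the helper returns [].
def pyStrMul (padding : Option String) (w : Int) : List Char :=
  match padding with
  | none => []
  | some p => (List.replicate w.toNat p.toList).flatten

-- ===== PORT A =====
def gridify (text : String) (w : Int) (padding : Option String) : List (List String) :=
  (PySem.List.pyRange 0 (text.toList.length : Int) w).foldl
    (fun g i =>
      if i + w ≤ (text.toList.length : Int) then
        g ++ [(PySem.List.slice text.toList (some i) (some (i + w))).map (fun c => String.ofList [c])]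
      else
        g ++ [(PySem.List.slice (text.toList ++ pyStrMul padding w) (some i) (some (i + w))).map
                (fun c => String.ofList [c])]) []

-- ===== PORT B =====
-- the body of B's main loop: append the character to the current row; flush the row when it reaches width w
def gridStep (w : Int) (st : List (List Char) × List Char) (ch : Char) : List (List Char) × List Char :=
  let cur := st.2 ++ [ch]
  if (cur.length : Int) = w then (st.1 ++ [cur], []) else (st.1, cur)

-- the body of B's pad loop; Python's `break` once the row is full is modeled exactly by the
-- full-row branch keeping the accumulator unchanged (all remaining iterations are no-ops)
def padStep (w : Int) (acc : List Char) (ch : Char) : List Char :=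
  if (acc.length : Int) = w then acc else acc ++ [ch]

-- rows are built as lists of characters and rendered as 1-character strings at the end
def gridify_alt (text : String) (w : Int) (padding : Option String) : List (List String) :=
  if w ≤ 0 then []
  else
    let st := text.toList.foldl (gridStep w) ([], [])
    let rows := if st.2 ≠ [] then st.1 ++ [(pyStrMul padding w).foldl (padStep w) st.2] else st.1
    rows.map (fun row => row.map (fun c => String.ofList [c]))

-- ===== PRECONDITION & SPEC =====
-- Pre_ excludes exactly the inputs where the Python A raises: w = 0 (range(0, len, 0) raises ValueError)
-- and padding = None when the last row overflows (None * w raises TypeError; B raises it identically).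
def Pre_gridify (text : String) (w : Int) (padding : Option String) : Prop :=
  w ≠ 0 ∧ (padding.isSome = true ∨ w < 0 ∨ PySem.Int.mod (text.toList.length : Int) w = 0)
instance (text : String) (w : Int) (padding : Option String) : Decidable (Pre_gridify text w padding) := by unfold Pre_gridify; infer_instance

def pvWitness_gridify : String × Int × Option String := ("abcde", 3, some " ")

def Spec_gridify (text : String) (w : Int) (padding : Option String) (out : List (List String)) : Prop := out = gridify_alt text w padding
instance (text : String) (w : Int) (padding : Option String) (out : List (List String)) : Decidable (Spec_gridify text w padding out) := by unfold Spec_gridify; infer_instance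

-- ===== CLAIM (what is proved, stated in full; the proofs are below) =====
def Claim_equal_gridify : Prop := ∀ (text : String) (w : Int) (padding : Option String), Dom_gridify text w padding → Pre_gridify text w padding → Spec_gridify text w padding (gridify text w padding)
-- ===== LEMMAS AND PROOFS =====

-- the common normal form both ports are reduced to: the ⌊N/W⌋ full chunks, plus (iff W ∤ N)
-- the leftover characters topped up from padding*w
def canonical (cs : List Char) (w : Int) (padding : Option String) : List (List Char) :=
  (List.range (cs.length / w.toNat)).map (fun k => (cs.drop (w.toNat * k)).take w.toNat) ++
  (if cs.length % w.toNat = 0 then []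
   else [cs.drop (w.toNat * (cs.length / w.toNat)) ++
          (pyStrMul padding w).take (w.toNat - cs.length % w.toNat)])

-- range(0, b, s) is empty for a negative step and 0 ≤ b
lemma pyRange_zero_of_neg (b s : Int) (hb : 0 ≤ b) (hs : s < 0) :
    PySem.List.pyRange 0 b s = [] := by
  simp only [PySem.List.pyRange]
  rw [if_neg (by omega), if_neg (by omega), if_neg (by omega)]
  simp

-- A's accumulator-appending loop with a two-way branch, as a map
lemma foldl_if_append {α β : Type} (p : β → Prop) [DecidablePred p] (f g : β → α) (l : List β) :
    l.foldl (fun acc i => if p i then acc ++ [f i] else acc ++ [g i]) [] =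
      l.map (fun i => if p i then f i else g i) := by
  have hfun : (fun (acc : List α) i => if p i then acc ++ [f i] else acc ++ [g i]) =
      fun acc i => acc ++ [if p i then f i else g i] := by
    funext acc i
    by_cases h : p i <;> simp [h]
  rw [hfun, PySem.List.foldl_append_singleton_eq_map]
  simp

-- ceiling division (N + W - 1) / W versus floor q and remainder r
lemma ceil_div_eq (N W q r : Nat) (hW : 0 < W) (hqr : W * q + r = N) (hr : r < W) :
    (N + W - 1) / W = if r = 0 then q else q + 1 := by
  split_ifs with h0
  · rcases Nat.eq_zero_or_pos N with hN | hN
    · have hq : q = 0 := by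
        by_contra hq
        have : W ≤ W * q := Nat.le_mul_of_pos_right W (by omega)
        omega
      rw [hq]
      exact Nat.div_eq_of_lt (by omega)
    · have he : N + W - 1 = W * q + (W - 1) := by omega
      rw [he, Nat.mul_add_div hW, Nat.div_eq_of_lt (by omega)]
      omega
  · have hmul : W * (q + 1) = W * q + W := by ring
    have he : N + W - 1 = W * (q + 1) + (r - 1) := by omega
    rw [he, Nat.mul_add_div hW, Nat.div_eq_of_lt (by omega)]

lemma gridify_eq_canonical (text : String) (w : Int) (padding : Option String) (hw : 0 < w) :
    gridify text w padding =
      (canonical text.toList w padding).map (fun row => row.map (fun c => String.ofList [c])) := by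
  obtain ⟨W, rfl⟩ := Int.eq_ofNat_of_zero_le hw.le
  have hW : 0 < W := by exact_mod_cast hw
  unfold gridify canonical
  set cs := text.toList with hcs
  set N := cs.length with hN
  set q := N / W with hq
  set r := N % W with hr
  have hqr : W * q + r = N := Nat.div_add_mod N W
  have hrW : r < W := Nat.mod_lt _ hW
  rw [PySem.List.pyRange_of_pos 0 (N : Int) hw]
  have htN : ((W : Int)).toNat = W := Int.toNat_natCast W
  have hcount : (if (0 : Int) < (N : Int) then (((N : Int) - 0 + W - 1) / W).toNat else 0) =
      (N + W - 1) / W := by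
    by_cases h0 : 0 < N
    · rw [if_pos (by exact_mod_cast h0)]
      have hc : ((N : Int) - 0 + W - 1) = ((N + W - 1 : Nat) : Int) := by push_cast; omega
      rw [hc, ← Int.natCast_div, Int.toNat_natCast]
    · rw [if_neg (by exact_mod_cast h0)]
      have hN0 : N = 0 := by omega
      rw [hN0]
      exact (Nat.div_eq_of_lt (by omega)).symm
  rw [hcount, foldl_if_append (fun i => i + W <= (N : Int))
    (fun i => (PySem.List.slice cs (some i) (some (i + W))).map (fun c => String.ofList [c]))
    (fun i => (PySem.List.slice (cs ++ pyStrMul padding W) (some i) (some (i + W))).map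
      (fun c => String.ofList [c])), List.map_map, htN, ceil_div_eq N W q r hW hqr hrW]
  have hfit : forall k : Nat, W * (k + 1) <= N ->
      (if (0 : Int) + W * k + W <= (N : Int) then
        (PySem.List.slice cs (some ((0 : Int) + W * k)) (some ((0 : Int) + W * k + W))).map
          (fun c => String.ofList [c])
      else
        (PySem.List.slice (cs ++ pyStrMul padding W) (some ((0 : Int) + W * k))
            (some ((0 : Int) + W * k + W))).map (fun c => String.ofList [c])) =
      ((cs.drop (W * k)).take W).map (fun c => String.ofList [c]) := by
    intro k hk
    have hmul : W * (k + 1) = W * k + W := by ring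
    rw [if_pos (by exact_mod_cast (show 0 + W * k + W <= N by omega))]
    rw [PySem.List.slice_toNat cs (by positivity) (by positivity)]
    have ha : ((0 : Int) + W * k).toNat = W * k := by
      rw [zero_add, <- Nat.cast_mul, Int.toNat_natCast]
    have hb : ((0 : Int) + W * k + W).toNat = W * k + W := by
      rw [zero_add, <- Nat.cast_mul, <- Nat.cast_add, Int.toNat_natCast]
    rw [ha, hb, Nat.add_sub_cancel_left]
  split_ifs with h0
  · rw [List.append_nil, List.map_map]
    apply List.map_congr_left
    intro k hk
    rw [List.mem_range] at hk
    simp only [Function.comp_apply]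
    refine hfit k ?_
    have h1 : W * (k + 1) <= W * q := mul_le_mul_left' (by omega) W
    omega
  · rw [List.range_succ, List.map_append, List.map_append, List.map_map]
    congr 1
    · apply List.map_congr_left
      intro k hk
      rw [List.mem_range] at hk
      simp only [Function.comp_apply]
      refine hfit k ?_
      have h1 : W * (k + 1) <= W * q := mul_le_mul_left' (by omega) W
      omega
    · -- the overflow row: slice of cs ++ padding*w at [W*q, W*q + W)
      simp only [List.map_cons, List.map_nil, Function.comp_apply]
      rw [if_neg (by exact_mod_cast (show ¬ (0 + W * q + W <= N) by omega))]
      rw [PySem.List.slice_toNat _ (by positivity) (by positivity)]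
      have ha : ((0 : Int) + W * q).toNat = W * q := by
        rw [zero_add, <- Nat.cast_mul, Int.toNat_natCast]
      have hb : ((0 : Int) + W * q + W).toNat = W * q + W := by
        rw [zero_add, <- Nat.cast_mul, <- Nat.cast_add, Int.toNat_natCast]
      rw [ha, hb, Nat.add_sub_cancel_left]
      congr 1
      rw [List.drop_append_of_le_length (by omega), List.take_append]
      have hlen : (cs.drop (W * q)).length = r := by simp [hN]; omega
      rw [hlen, List.take_of_length_le (by omega : (cs.drop (W * q)).length <= W)]

-- ===== B-side: the character fold produces exactly the full chunks plus the leftover row =====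

-- a stretch of characters too short to fill the row just accumulates
lemma fold_small (W : Nat) : ∀ (cs cur : List Char) (rows : List (List Char)),
    cur.length + cs.length < W →
    cs.foldl (gridStep (W : Int)) (rows, cur) = (rows, cur ++ cs) := by
  intro cs
  induction cs with
  | nil => intro cur rows h; simp
  | cons c cs ih =>
    intro cur rows h
    simp only [List.foldl_cons, gridStep, List.length_append, List.length_cons,
      List.length_nil, Nat.cast_inj]
    rw [if_neg (by push_cast; simp at h ⊢; omega)]
    rw [ih (cur ++ [c]) rows (by simp at h ⊢; omega)]
    simp

-- once enough characters remain, the fold flushes exactly one full row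
lemma fold_chunk (W : Nat) (hW : 0 < W) : ∀ (cs cur : List Char) (rows : List (List Char)),
    cur.length < W → W ≤ cur.length + cs.length →
    cs.foldl (gridStep (W : Int)) (rows, cur) =
      (cs.drop (W - cur.length)).foldl (gridStep (W : Int))
        (rows ++ [cur ++ cs.take (W - cur.length)], []) := by
  intro cs
  induction cs with
  | nil => intro cur rows h1 h2; simp at h2; omega
  | cons c cs ih =>
    intro cur rows h1 h2
    simp only [List.foldl_cons, gridStep]
    by_cases hfull : cur.length + 1 = W
    · rw [if_pos (by push_cast; simp; omega)]
      have hk : W - cur.length = 1 := by omega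
      rw [hk]
      simp
    · rw [if_neg (by push_cast; simp; omega)]
      obtain ⟨k, hk⟩ : ∃ k, W - cur.length = k + 2 := ⟨W - cur.length - 2, by omega⟩
      rw [ih (cur ++ [c]) rows (by simp; omega) (by simp at h2 ⊢; omega)]
      have hk' : W - (cur ++ [c]).length = k + 1 := by simp; omega
      rw [hk, hk']
      simp

-- the whole pass: ⌊m/W⌋ flushed chunks and the remainder as the pending row
lemma fold_main (W : Nat) (hW : 0 < W) : ∀ (m : Nat) (cs : List Char) (rows : List (List Char)),
    cs.length = m →
    cs.foldl (gridStep (W : Int)) (rows, []) =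
      (rows ++ (List.range (m / W)).map (fun k => (cs.drop (W * k)).take W),
       cs.drop (W * (m / W))) := by
  intro m
  induction m using Nat.strong_induction_on with
  | _ m ih =>
    intro cs rows hlen
    by_cases hm : m < W
    · have h0 : m / W = 0 := Nat.div_eq_of_lt hm
      rw [fold_small W cs [] rows (by simp [hlen]; omega)]
      simp [h0]
    · push_neg at hm
      rw [fold_chunk W hW cs [] rows (by simpa using hW) (by simp [hlen]; omega)]
      simp only [List.length_nil, Nat.sub_zero, List.nil_append]
      have hdl : (cs.drop W).length = m - W := by simp [hlen]
      rw [ih (m - W) (by omega) (cs.drop W) _ hdl]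
      have hq' : m / W = (m - W) / W + 1 := Nat.div_eq_sub_div hW hm
      have hdrop : forall k : Nat, (cs.drop W).drop (W * k) = cs.drop (W * (k + 1)) := by
        intro k
        rw [List.drop_drop]
        congr 1
        ring
      rw [hq']
      simp only [Prod.mk.injEq]
      constructor
      · rw [List.range_succ_eq_map, List.map_cons, List.map_map, List.append_assoc,
          List.singleton_append]
        congr 1
        congr 1
        apply List.map_congr_left
        intro k hk
        simp only [Function.comp_apply, Nat.succ_eq_add_one]
        rw [hdrop k]
      · rw [hdrop]

-- once the row is full, the pad loop is a no-op (Python's `break`)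
lemma padFill_stall (W : Nat) : ∀ (pad cur : List Char), cur.length = W →
    pad.foldl (padStep (W : Int)) cur = cur := by
  intro pad
  induction pad with
  | nil => intro cur h; rfl
  | cons p ps ih =>
    intro cur h
    simp only [List.foldl_cons, padStep]
    rw [if_pos (by exact_mod_cast h)]
    exact ih cur h

-- the pad loop tops the row up to width W from the pad characters
lemma padFill_eq (W : Nat) : ∀ (pad cur : List Char), cur.length ≤ W →
    pad.foldl (padStep (W : Int)) cur = cur ++ pad.take (W - cur.length) := by
  intro pad
  induction pad with
  | nil => intro cur h; simp
  | cons p ps ih =>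
    intro cur h
    by_cases hfull : cur.length = W
    · rw [padFill_stall W (p :: ps) cur hfull]
      simp [hfull]
    · simp only [List.foldl_cons, padStep]
      rw [if_neg (by push_cast; omega)]
      rw [ih (cur ++ [p]) (by simp; omega)]
      obtain ⟨k, hk⟩ : ∃ k, W - cur.length = k + 1 := ⟨W - cur.length - 1, by omega⟩
      have hk' : W - (cur ++ [p]).length = k := by simp; omega
      rw [hk, hk']
      simp

lemma alt_eq_canonical (text : String) (w : Int) (padding : Option String) (hw : 0 < w) :
    gridify_alt text w padding =
      (canonical text.toList w padding).map (fun row => row.map (fun c => String.ofList [c])) := by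
  obtain ⟨W, rfl⟩ := Int.eq_ofNat_of_zero_le hw.le
  have hW : 0 < W := by exact_mod_cast hw
  have htN : ((W : Int)).toNat = W := Int.toNat_natCast W
  simp only [gridify_alt, canonical, htN]
  rw [if_neg (by omega : ¬ ((W : Int) <= 0))]
  rw [fold_main W hW text.toList.length text.toList [] rfl]
  simp only [List.nil_append]
  have hqr : W * (text.toList.length / W) + text.toList.length % W = text.toList.length :=
    Nat.div_add_mod _ W
  have hrW : text.toList.length % W < W := Nat.mod_lt _ hW
  have hcurlen : (text.toList.drop (W * (text.toList.length / W))).length =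
      text.toList.length % W := by rw [List.length_drop]; omega
  by_cases h0 : text.toList.length % W = 0
  · have hnil : text.toList.drop (W * (text.toList.length / W)) = [] :=
      List.eq_nil_of_length_eq_zero (by omega)
    rw [if_neg (fun h => h hnil), if_pos h0, List.append_nil]
  · rw [if_pos (by rw [<- List.length_pos_iff]; omega), if_neg h0]
    rw [padFill_eq W (pyStrMul padding W) _ (by omega), hcurlen]

-- ===== VERDICT (by name: the statement is the Claim_ definition above) =====
theorem gridify_spec : Claim_equal_gridify := by
  intro text w padding _ hpre
  obtain ⟨hw0, -⟩ := hpre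
  unfold Spec_gridify
  rcases lt_trichotomy w 0 with hw | hw | hw
  · unfold gridify gridify_alt
    rw [pyRange_zero_of_neg _ w (by positivity) hw, if_pos (le_of_lt hw)]
    rfl
  · exact absurd hw hw0
  · rw [gridify_eq_canonical text w padding hw, alt_eq_canonical text w padding hw]
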